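-- pv_equiv track=rewrite | github.com/openclaw/openclaw | scripts/runtime/sense_runtime_remediation.py | resolve_missing_requirements_next_step
-- ===== SOURCE A (Python) =====
-- PRIORITIZED_REQUIREMENT_STEPS = [
--     ('API key missing:', 'check_api_key_config'),
--     ('API key missing', 'check_api_key_config'),
--     ('API key may be required', 'check_api_key_config'),
--     ('provider configuration missing', 'check_provider_config'),
--     ('model configuration missing', 'check_model_config'),
--     ('nim is not running', 'start_nim_runtime'),
--     ('gpu runtime not enabled', 'enable_gpu_runtime'),
--     ('nvidia policy missing', 'review_runtime_capabilities'),
-- ]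
--
-- def resolve_missing_requirements_next_step(missing_requirements: list[str] | None) -> str | None:
--     if not isinstance(missing_requirements, list):
--         return None
--     for requirement, next_step in PRIORITIZED_REQUIREMENT_STEPS:
--         for missing in missing_requirements:
--             if requirement.endswith(':'):
--                 if isinstance(missing, str) and missing.startswith(requirement):
--                     return next_step
--             elif requirement == missing:
--                 return next_step
--     return None
-- ===== SOURCE B (Python) =====
-- PRIORITIZED_REQUIREMENT_STEPS = [
--     ('API key missing:', 'check_api_key_config'),
--     ('API key missing', 'check_api_key_config'),
--     ('API key may be required', 'check_api_key_config'),
--     ('provider configuration missing', 'check_provider_config'),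
--     ('model configuration missing', 'check_model_config'),
--     ('nim is not running', 'start_nim_runtime'),
--     ('gpu runtime not enabled', 'enable_gpu_runtime'),
--     ('nvidia policy missing', 'review_runtime_capabilities'),
-- ]
--
-- def resolve_missing_requirements_next_step(missing_requirements):
--     if not isinstance(missing_requirements, list):
--         return None
--     best_index = None
--     for missing in missing_requirements:
--         for index, (requirement, _step) in enumerate(PRIORITIZED_REQUIREMENT_STEPS):
--             if requirement.endswith(':'):
--                 matched = isinstance(missing, str) and missing.startswith(requirement)
--             else:
--                 matched = requirement == missing
--             if matched:
--                 if best_index is None or index < best_index: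
--                     best_index = index
--                 break
--     if best_index is None:
--         return None
--     return PRIORITIZED_REQUIREMENT_STEPS[best_index][1]
-- ===== Notes on version B (the rewrite author's own statement) =====
-- stated objective: alternative
-- what changed: Inverted the nested loops: B scans each missing requirement once for its first matching step index (breaking early) and keeps a running minimum index, instead of A's priority-outer loop that rescans the whole missing list for every step.
import Mathlib
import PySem

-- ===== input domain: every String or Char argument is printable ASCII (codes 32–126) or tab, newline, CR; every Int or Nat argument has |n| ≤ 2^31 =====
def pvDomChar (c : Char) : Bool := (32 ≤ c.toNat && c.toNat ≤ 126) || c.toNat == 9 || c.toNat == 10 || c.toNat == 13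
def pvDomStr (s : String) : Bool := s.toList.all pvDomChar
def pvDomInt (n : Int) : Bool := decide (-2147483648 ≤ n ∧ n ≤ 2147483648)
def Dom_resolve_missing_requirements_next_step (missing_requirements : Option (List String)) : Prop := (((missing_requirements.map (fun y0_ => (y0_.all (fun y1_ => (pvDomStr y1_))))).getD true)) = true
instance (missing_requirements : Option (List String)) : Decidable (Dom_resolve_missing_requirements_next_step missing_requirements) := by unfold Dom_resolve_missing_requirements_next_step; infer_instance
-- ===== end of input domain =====

-- B inverts A's loop nesting: it scans each missing entry once for its first matching
-- step index and keeps a running minimum index (objective: alternative decomposition).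

-- ===== PORT A =====
def pvSteps : List (String × String) := [
  ("API key missing:", "check_api_key_config"),
  ("API key missing", "check_api_key_config"),
  ("API key may be required", "check_api_key_config"),
  ("provider configuration missing", "check_provider_config"),
  ("model configuration missing", "check_model_config"),
  ("nim is not running", "start_nim_runtime"),
  ("gpu runtime not enabled", "enable_gpu_runtime"),
  ("nvidia policy missing", "review_runtime_capabilities")]

-- inner loop of A: `for missing in missing_requirements: …` (isinstance(missing, str) is
-- always true under the type convention)
def aScanMissing (req step : String) : List String → Option String
  | [] => none
  | missing :: rest =>
    if PySem.Str.endswith req ":" then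
      if PySem.Str.startswith missing req then some step else aScanMissing req step rest
    else if req == missing then some step else aScanMissing req step rest

-- outer loop of A over PRIORITIZED_REQUIREMENT_STEPS
def aScanSteps : List (String × String) → List String → Option String
  | [], _ => none
  | (req, step) :: rest, ms =>
    match aScanMissing req step ms with
    | some r => some r
    | none => aScanSteps rest ms

def resolve_missing_requirements_next_step (missing_requirements : Option (List String)) : Option String :=
  match missing_requirements with
  | none => none
  | some ms => aScanSteps pvSteps ms

-- ===== PORT B =====
-- B's match test (the `matched = …` expression)
def bMatch (req missing : String) : Bool :=
  if PySem.Str.endswith req ":" then PySem.Str.startswith missing req else req == missing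

-- B's inner `for index, (requirement, _step) in enumerate(...)` with `break` on first match
def bFirstIdx (missing : String) : List (String × String) → Nat → Option Nat
  | [], _ => none
  | (req, _) :: rest, i => if bMatch req missing then some i else bFirstIdx missing rest (i + 1)

-- `if best_index is None or index < best_index: best_index = index`
def bMin : Option Nat → Nat → Option Nat
  | none, i => some i
  | some b, i => if i < b then some i else some b

-- B's outer loop over the missing entries, accumulating best_index
def bBest : List String → Option Nat → Option Nat
  | [], best => best
  | m :: rest, best =>
    match bFirstIdx m pvSteps 0 with
    | some i => bBest rest (bMin best i)
    | none => bBest rest best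

def resolve_missing_requirements_next_step_alt (missing_requirements : Option (List String)) : Option String :=
  match missing_requirements with
  | none => none
  | some ms =>
    match bBest ms none with
    | none => none
    | some i => (PySem.List.pyGet? pvSteps (i : Int)).map (·.2)

-- ===== PRECONDITION & SPEC =====
def Spec_resolve_missing_requirements_next_step (missing_requirements : Option (List String)) (out : Option String) : Prop := out = resolve_missing_requirements_next_step_alt missing_requirements
instance (missing_requirements : Option (List String)) (out : Option String) : Decidable (Spec_resolve_missing_requirements_next_step missing_requirements out) := by unfold Spec_resolve_missing_requirements_next_step; infer_instance

-- ===== CLAIM (what is proved, stated in full; the proofs are below) =====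
def Claim_equal_resolve_missing_requirements_next_step : Prop := ∀ (missing_requirements : Option (List String)), Dom_resolve_missing_requirements_next_step missing_requirements → Spec_resolve_missing_requirements_next_step missing_requirements (resolve_missing_requirements_next_step missing_requirements)

-- ===== LEMMAS AND PROOFS =====

-- the predicate "some missing entry matches this step's requirement"
def anyPred (ms : List String) (p : String × String) : Bool := ms.any (fun m => bMatch p.1 m)

-- min on Option Nat with none as identity
def omin : Option Nat → Option Nat → Option Nat
  | none, b => b
  | some a, none => some a
  | some a, some b => some (min a b)

theorem omin_assoc (a b c : Option Nat) : omin (omin a b) c = omin a (omin b c) := by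
  cases a <;> cases b <;> cases c <;> simp [omin, Nat.min_assoc]

theorem bMin_eq_omin (best : Option Nat) (i : Nat) : bMin best i = omin best (some i) := by
  cases best with
  | none => rfl
  | some b =>
    simp only [bMin, omin]
    split_ifs with h <;> congr 1 <;> omega

theorem aScanMissing_eq (req step : String) (ms : List String) :
    aScanMissing req step ms = if ms.any (fun m => bMatch req m) then some step else none := by
  induction ms with
  | nil => simp [aScanMissing]
  | cons m rest ih =>
    simp only [aScanMissing, List.any_cons, bMatch]
    split_ifs with h1 h2 h3 <;> simp_all [bMatch]

theorem aScanSteps_eq (steps : List (String × String)) (ms : List String) :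
    aScanSteps steps ms = (steps.find? (anyPred ms)).map (·.2) := by
  induction steps with
  | nil => simp [aScanSteps]
  | cons p rest ih =>
    obtain ⟨req, step⟩ := p
    rw [aScanSteps, aScanMissing_eq]
    cases hx : ms.any (fun m => bMatch req m) with
    | true => simp [hx, anyPred]
    | false => simp [hx, anyPred, ih]

theorem bFirstIdx_eq (missing : String) (steps : List (String × String)) (i : Nat) :
    bFirstIdx missing steps i = (steps.findIdx? (fun p => bMatch p.1 missing)).map (· + i) := by
  induction steps generalizing i with
  | nil => simp [bFirstIdx]
  | cons p rest ih =>
    obtain ⟨req, step⟩ := p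
    rw [bFirstIdx, List.findIdx?_cons]
    by_cases h : bMatch req missing
    · simp [h]
    · simp [h, ih (i + 1), Option.map_map]
      cases rest.findIdx? (fun p => bMatch p.1 missing) <;> simp <;> omega

theorem findIdx?_or (steps : List (String × String)) (m : String) (ms : List String) :
    steps.findIdx? (fun p => bMatch p.1 m || anyPred ms p)
      = omin (steps.findIdx? (fun p => bMatch p.1 m)) (steps.findIdx? (anyPred ms)) := by
  induction steps with
  | nil => simp [omin]
  | cons p rest ih =>
    simp only [List.findIdx?_cons]
    by_cases h1 : bMatch p.1 m <;> by_cases h2 : anyPred ms p <;>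
      simp [h1, h2, omin, ih]
    · cases rest.findIdx? (anyPred ms) <;> simp
    · cases rest.findIdx? (fun p => bMatch p.1 m) <;> simp
    · cases rest.findIdx? (fun p => bMatch p.1 m) <;>
        cases rest.findIdx? (anyPred ms) <;> simp <;> omega

theorem bBest_eq (ms : List String) (best : Option Nat) :
    bBest ms best = omin best (pvSteps.findIdx? (anyPred ms)) := by
  induction ms generalizing best with
  | nil =>
    have h : pvSteps.findIdx? (anyPred []) = none := by
      simp [anyPred, List.findIdx?_eq_none_iff]
    rw [bBest, h]; cases best <;> rfl
  | cons m rest ih =>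
    rw [bBest, bFirstIdx_eq]
    have hcomb : pvSteps.findIdx? (anyPred (m :: rest))
        = omin (pvSteps.findIdx? (fun p => bMatch p.1 m)) (pvSteps.findIdx? (anyPred rest)) := by
      have := findIdx?_or pvSteps m rest
      simpa [anyPred, List.any_cons] using this
    cases hfi : pvSteps.findIdx? (fun p => bMatch p.1 m) with
    | none => simp [hfi, ih, hcomb, omin]
    | some i =>
      simp only [Option.map_some]
      rw [ih, bMin_eq_omin, hcomb, hfi, omin_assoc]
      norm_num

theorem find?_by_idx (steps : List (String × String)) (q : String × String → Bool) :
    (match steps.findIdx? q with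
      | none => none
      | some i => (PySem.List.pyGet? steps (i : Int)).map (·.2))
      = (steps.find? q).map (·.2) := by
  induction steps with
  | nil => simp
  | cons p rest ih =>
    rw [List.findIdx?_cons, List.find?_cons]
    by_cases h : q p
    · simp [h]
    · simp only [h, if_neg, Bool.false_eq_true, not_false_iff]
      rw [← ih]
      cases hfi : rest.findIdx? q with
      | none => simp
      | some i => simp [PySem.List.pyGet?_natCast]

-- ===== VERDICT (by name: the statement is the Claim_ definition above) =====
theorem resolve_missing_requirements_next_step_spec : Claim_equal_resolve_missing_requirements_next_step := by
  intro mr _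
  unfold Spec_resolve_missing_requirements_next_step
  cases mr with
  | none => rfl
  | some ms =>
    show aScanSteps pvSteps ms =
      (match bBest ms none with
        | none => none
        | some i => (PySem.List.pyGet? pvSteps (i : Int)).map (·.2))
    rw [aScanSteps_eq, bBest_eq]
    simp only [omin]
    exact (find?_by_idx pvSteps (anyPred ms)).symm
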